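-- pv_equiv track=rewrite | github.com/docxology/MetaInformAnt | src/metainformant/dna/population/core.py | segregating_sites
-- ===== SOURCE A (Python) =====
-- from typing import Iterable, List, Sequence, Tuple
--
-- def segregating_sites(seqs: Sequence[str]) -> int:
--     """Count the number of segregating sites in aligned sequences.
--
--     A segregating site is a position where at least two different nucleotides
--     are observed (excluding gaps and ambiguous bases).
--
--     Args:
--         seqs: Sequence of aligned DNA sequences
--
--     Returns:
--         Number of segregating sites
--     """
--     if len(seqs) < 2:
--         return 0
--
--     if not _check_alignment(seqs):
--         raise ValueError("Sequences must be aligned")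
--
--     seq_length = len(seqs[0])
--     segregating_count = 0
--
--     for pos in range(seq_length):
--         bases_at_pos = set()
--
--         for seq in seqs:
--             base = seq[pos].upper()
--             if base in "ATCG":
--                 bases_at_pos.add(base)
--
--         if len(bases_at_pos) > 1:
--             segregating_count += 1
--
--     return segregating_count
--
-- def _check_alignment(seqs: Sequence[str]) -> bool:
--     """Check if sequences are properly aligned (same length)."""
--     if not seqs:
--         return True
--
--     length = len(seqs[0])
--     return all(len(seq) == length for seq in seqs)
-- ===== SOURCE B (Python) =====
-- def segregating_sites(seqs):
--     """Count segregating sites via a single row-major pass keeping, per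
--     position, the first valid base seen and a 'segregating' flag (no sets)."""
--     if len(seqs) < 2:
--         return 0
--     length = len(seqs[0])
--     if any(len(s) != length for s in seqs):
--         raise ValueError("Sequences must be aligned")
--     first = [None] * length
--     seg = [False] * length
--     for seq in seqs:
--         for i, ch in enumerate(seq):
--             b = ch.upper()
--             if b in "ATCG":
--                 if first[i] is None:
--                     first[i] = b
--                 elif first[i] != b:
--                     seg[i] = True
--     return sum(seg)
-- ===== Notes on version B (the rewrite author's own statement) =====
-- stated objective: alternative
-- what changed: Replaces the position-outer loop that rebuilds a set of bases per column with a single row-major pass maintaining, per position, only the first valid base and a boolean segregating flag.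
import Mathlib
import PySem

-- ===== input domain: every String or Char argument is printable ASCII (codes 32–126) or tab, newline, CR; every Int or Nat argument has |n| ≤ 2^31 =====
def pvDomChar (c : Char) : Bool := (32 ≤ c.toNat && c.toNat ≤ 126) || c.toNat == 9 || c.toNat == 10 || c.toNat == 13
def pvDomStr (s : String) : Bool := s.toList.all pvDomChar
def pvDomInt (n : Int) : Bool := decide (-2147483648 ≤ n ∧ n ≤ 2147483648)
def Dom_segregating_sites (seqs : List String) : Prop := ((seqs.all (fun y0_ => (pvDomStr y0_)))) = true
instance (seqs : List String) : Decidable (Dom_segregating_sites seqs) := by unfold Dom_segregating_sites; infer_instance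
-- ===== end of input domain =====

-- B replaces A's position-outer/set-per-column scan with a single row-major pass
-- keeping per position only the first valid base and a segregating flag (alternative decomposition, same cost).


-- ===== PORT A =====
-- seq[pos] is ported as seq.toList[pos]?; the none branch (IndexError) is unreachable under Pre_.
def segregating_sites (seqs : List String) : Int :=
  if seqs.length < 2 then 0
  else
    let L := (seqs.headD "").toList.length
    (List.range L).foldl (fun acc pos =>
      let bases : PySem.Set Char := seqs.foldl (fun st sq =>
        match sq.toList[pos]? with
        | none => st
        | some c =>
          let b := PySem.Chars.upperChar c
          if b ∈ ['A', 'T', 'C', 'G'] then PySem.Set.add st b else st) PySem.Set.empty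
      if 1 < bases.length then acc + 1 else acc) 0

-- ===== PORT B =====
-- per-position state: (first valid base seen (None initially), segregating flag)
def pvStepB (st : Option Char × Bool) (c : Char) : Option Char × Bool :=
  let b := PySem.Chars.upperChar c
  if b ∈ ['A', 'T', 'C', 'G'] then
    match st.1 with
    | none => (some b, st.2)
    | some x => (some x, st.2 || (x != b))
  else st

def segregating_sites_alt (seqs : List String) : Int :=
  if seqs.length < 2 then 0
  else
    let L := (seqs.headD "").toList.length
    let final := seqs.foldl (fun st sq => List.zipWith pvStepB st sq.toList)
      (List.replicate L ((none : Option Char), false))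
    ((final.countP (·.2) : Nat) : Int)

-- ===== PRECONDITION & SPEC =====
-- Pre_ excludes exactly the inputs where A raises ValueError: ≥2 sequences of differing lengths.
def Pre_segregating_sites (seqs : List String) : Prop :=
  seqs.length < 2 ∨ ∀ s ∈ seqs, s.toList.length = (seqs.headD "").toList.length
instance (seqs : List String) : Decidable (Pre_segregating_sites seqs) := by
  unfold Pre_segregating_sites; infer_instance
def pvWitness_segregating_sites : List String := ["ATcG", "AACG", "GT-G"]

def Spec_segregating_sites (seqs : List String) (out : Int) : Prop := out = segregating_sites_alt seqs
instance (seqs : List String) (out : Int) : Decidable (Spec_segregating_sites seqs out) := by unfold Spec_segregating_sites; infer_instance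

-- ===== CLAIM (what is proved, stated in full; the proofs are below) =====
def Claim_equal_segregating_sites : Prop := ∀ (seqs : List String), Dom_segregating_sites seqs → Pre_segregating_sites seqs → Spec_segregating_sites seqs (segregating_sites seqs)

-- ===== LEMMAS AND PROOFS =====

-- A's per-column set update, one row (same body as A's inner fold step).
def pvColStep (st : PySem.Set Char) (r : List Char) (pos : Nat) : PySem.Set Char :=
  match r[pos]? with
  | none => st
  | some c =>
    let b := PySem.Chars.upperChar c
    if b ∈ ['A', 'T', 'C', 'G'] then PySem.Set.add st b else st

lemma pvFoldl_toList {β : Type} (seqs : List String) (g : β → List Char → β) (b : β) :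
    seqs.foldl (fun st sq => g st sq.toList) b = (seqs.map String.toList).foldl g b := by
  rw [List.foldl_map]

-- one step of B preserves the first-base / ≥2-distinct-bases relation with A's set
lemma pvStep_inv (s : PySem.Set Char) (p : Option Char × Bool) (c : Char)
    (h1 : p.1 = s.head?) (h2 : p.2 = decide (2 ≤ s.length)) :
    (pvStepB p c).1 = (if PySem.Chars.upperChar c ∈ ['A', 'T', 'C', 'G']
        then PySem.Set.add s (PySem.Chars.upperChar c) else s).head? ∧
    (pvStepB p c).2 = decide (2 ≤ (if PySem.Chars.upperChar c ∈ ['A', 'T', 'C', 'G']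
        then PySem.Set.add s (PySem.Chars.upperChar c) else s).length) := by
  set b := PySem.Chars.upperChar c with hb
  by_cases hmem : b ∈ ['A', 'T', 'C', 'G']
  · simp only [pvStepB, ← hb, if_pos hmem]
    match s, h1, h2 with
    | [], h1, h2 =>
      have hadd : PySem.Set.add ([] : PySem.Set Char) b = [b] := rfl
      rw [hadd]
      simp at h2
      simp [h1, h2]
    | [x], h1, h2 =>
      simp only [List.head?_cons] at h1
      simp only [List.length_cons, List.length_nil] at h2
      by_cases hbx : b = x
      · have hadd : PySem.Set.add [x] b = [x] := by
          simp [PySem.Set.add, hbx]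
        rw [hadd]
        have hg : p.2 = false := by rw [h2]; simp
        simp [h1, hg, hbx]
      · have hadd : PySem.Set.add [x] b = [x, b] := by
          simp [PySem.Set.add, hbx]
        rw [hadd]
        have hg : p.2 = false := by rw [h2]; simp
        have hne : x ≠ b := fun hh => hbx hh.symm
        simp [h1, hg, hne]
    | x :: y :: t, h1, h2 =>
      simp only [List.head?_cons] at h1
      have hg : p.2 = true := by rw [h2]; simp
      have hh : (PySem.Set.add (x :: y :: t) b).head? = some x := by
        simp only [PySem.Set.add]; split <;> simp
      have hl : 2 ≤ (PySem.Set.add (x :: y :: t) b).length := by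
        simp only [PySem.Set.add]; split <;> (simp; try omega)
      constructor
      · simp [h1, hh]
      · simp [h1, hg, hl]
  · have hmem' : ¬(b = 'A' ∨ b = 'T' ∨ b = 'C' ∨ b = 'G') := by simpa using hmem
    simp [pvStepB, ← hb, hmem', h1, h2]

-- column invariant over all rows
lemma pvCol_inv (rows : List (List Char)) (i : Nat) (hi : ∀ r ∈ rows, i < r.length) :
    ∀ (s : PySem.Set Char) (p : Option Char × Bool),
      p.1 = s.head? → p.2 = decide (2 ≤ s.length) →
      (rows.foldl (fun a r => pvStepB a (r.getD i 'x')) p).1 =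
        (rows.foldl (fun st r => pvColStep st r i) s).head? ∧
      (rows.foldl (fun a r => pvStepB a (r.getD i 'x')) p).2 =
        decide (2 ≤ (rows.foldl (fun st r => pvColStep st r i) s).length) := by
  induction rows with
  | nil => intro s p h1 h2; exact ⟨h1, h2⟩
  | cons r rows ih =>
    intro s p h1 h2
    have hir : i < r.length := hi r (List.mem_cons_self ..)
    have hget : r[i]? = some r[i] := List.getElem?_eq_getElem hir
    have hgetD : r.getD i 'x' = r[i] := by simp [List.getD, hget]
    simp only [List.foldl_cons, hgetD]
    have hstep := pvStep_inv s p r[i] h1 h2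
    have hcol : pvColStep s r i = (if PySem.Chars.upperChar r[i] ∈ ['A', 'T', 'C', 'G']
        then PySem.Set.add s (PySem.Chars.upperChar r[i]) else s) := by
      simp [pvColStep, hget]
    rw [← hcol] at hstep
    exact ih (fun r hr => hi r (List.mem_cons_of_mem _ hr)) _ _ hstep.1 hstep.2

-- B's row-major fold over aligned rows is the list of independent per-column folds
lemma pvFold_eq_map (rows : List (List Char)) (L : Nat) (hrows : ∀ r ∈ rows, r.length = L) :
    ∀ (g : Nat → Option Char × Bool),
      rows.foldl (fun st r => List.zipWith pvStepB st r) ((List.range L).map g) =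
      (List.range L).map (fun i => rows.foldl (fun a r => pvStepB a (r.getD i 'x')) (g i)) := by
  induction rows with
  | nil => intro g; simp
  | cons r rows ih =>
    intro g
    have hr : r.length = L := hrows r (List.mem_cons_self ..)
    have hzip : List.zipWith pvStepB ((List.range L).map g) r =
        (List.range L).map (fun i => pvStepB (g i) (r.getD i 'x')) := by
      apply List.ext_getElem
      · simp [hr]
      · intro i h1 h2
        have hiL : i < L := by simpa using h2
        simp [List.getElem_zipWith, List.getD, List.getElem?_eq_getElem (by omega : i < r.length)]
    simp only [List.foldl_cons, hzip,
      ih (fun r hr => hrows r (List.mem_cons_of_mem _ hr))]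

-- ===== VERDICT (by name: the statement is the Claim_ definition above) =====
theorem segregating_sites_spec : Claim_equal_segregating_sites := by
  intro seqs _ hpre
  unfold Spec_segregating_sites segregating_sites segregating_sites_alt
  by_cases hlen : seqs.length < 2
  · simp [hlen]
  · rcases hpre with h | h
    · exact absurd h hlen
    simp only [if_neg hlen]
    set L := (seqs.headD "").toList.length with hL
    set rows := seqs.map String.toList with hrw
    have hrows : ∀ r ∈ rows, r.length = L := by
      intro r hr
      rcases List.mem_map.mp hr with ⟨s, hs, rfl⟩
      exact h s hs
    -- B side
    have hrep : List.replicate L ((none : Option Char), false) =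
        (List.range L).map (fun _ => ((none : Option Char), false)) := by
      simp [List.map_const']
    have hBfold : seqs.foldl (fun st sq => List.zipWith pvStepB st sq.toList)
        (List.replicate L ((none : Option Char), false)) =
        (List.range L).map (fun i =>
          rows.foldl (fun a r => pvStepB a (r.getD i 'x')) ((none : Option Char), false)) := by
      rw [hrep, pvFoldl_toList seqs (fun st r => List.zipWith pvStepB st r), ← hrw]
      exact pvFold_eq_map rows L hrows _
    rw [hBfold, List.countP_map]
    -- A side
    have hAfold : ∀ pos : Nat, seqs.foldl (fun st sq =>
        match sq.toList[pos]? with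
        | none => st
        | some c =>
          let b := PySem.Chars.upperChar c
          if b ∈ ['A', 'T', 'C', 'G'] then PySem.Set.add st b else st) PySem.Set.empty =
        rows.foldl (fun st r => pvColStep st r pos) PySem.Set.empty := by
      intro pos
      rw [show (fun (st : PySem.Set Char) (sq : String) =>
        match sq.toList[pos]? with
        | none => st
        | some c =>
          let b := PySem.Chars.upperChar c
          if b ∈ ['A', 'T', 'C', 'G'] then PySem.Set.add st b else st) =
        (fun st sq => pvColStep st sq.toList pos) from rfl]
      rw [pvFoldl_toList seqs (fun st r => pvColStep st r pos), ← hrw]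
    simp only [hAfold]
    rw [PySem.List.foldl_ite_add_one, zero_add]
    congr 1
    apply List.countP_congr
    intro i hi
    have hiL : i < L := List.mem_range.mp hi
    have hcol := pvCol_inv rows i (fun r hr => by rw [hrows r hr]; exact hiL)
      PySem.Set.empty ((none : Option Char), false) rfl rfl
    simp only [Function.comp_apply]
    rw [hcol.2]
    simp only [decide_eq_true_eq]
    omega
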